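-- pv_equiv track=rewrite | github.com/William495t/Proyecto_ADA2 | funcionalidad.py | generar_matriz_ganancias
-- ===== SOURCE A (Python) =====
-- def generar_matriz_cuadrada(n):
--     return [[0 for _ in range(n)] for _ in range(n)]
--
-- def calcular_ganancia(array, y, x):
--     sumatoria = 0
--     for jy in range(max(0, y - 1), min(len(array), y + 2)):
--         for jx in range(max(0, x - 1), min(len(array[0]), x + 2)):
--             sumatoria += array[jy][jx]
--     return sumatoria
--
-- def es_contiguo(x, y, ubicaciones_existentes, n):
--     for ux, uy in ubicaciones_existentes:
--         if max(0, y - 1) <= uy <= min(n - 1, y + 1) and max(0, x - 1) <= ux <= min(n - 1, x + 1):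
--             return True
--     return False
--
-- def generar_matriz_ganancias(array, ubicaciones_existentes, minimo_numero):
--     n = len(array)
--     matriz = generar_matriz_cuadrada(n)
--     for y in range(n):
--         for x in range(n):
--             if es_contiguo(x, y, ubicaciones_existentes, n) or calcular_ganancia(array, y, x) < minimo_numero:
--                 matriz[y][x] = 0
--             else:
--                 matriz[y][x] = calcular_ganancia(array, y, x)
--     return matriz
-- ===== SOURCE B (Python) =====
-- def generar_matriz_ganancias(array, ubicaciones_existentes, minimo_numero):
--     n = len(array)
--     if n == 0:
--         return []
--     C = len(array[0])
--     # Only columns < min(C, n+1) ever fall inside a 3x3 window, so the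
--     # summed-area table needs only that width.
--     W = min(C, n + 1)
--     # P[i][j] = sum of array[r][c] for r < i, c < j  (summed-area table)
--     P = [[0] * (W + 1)]
--     for row in array:
--         prev = P[-1]
--         cur = [0] * (W + 1)
--         acc = 0
--         for j in range(W):
--             acc += row[j]
--             cur[j + 1] = prev[j + 1] + acc
--         P.append(cur)
--     # mark every cell contiguous to an existing (in-grid) location, once
--     blocked = [[False] * n for _ in range(n)]
--     for ux, uy in ubicaciones_existentes:
--         if 0 <= ux < n and 0 <= uy < n:
--             for yy in range(max(0, uy - 1), min(n, uy + 2)):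
--                 for xx in range(max(0, ux - 1), min(n, ux + 2)):
--                     blocked[yy][xx] = True
--     out = []
--     for y in range(n):
--         y0, y1 = max(0, y - 1), min(n, y + 2)
--         fila = []
--         for x in range(n):
--             x0, x1 = min(W, max(0, x - 1)), min(W, x + 2)
--             s = P[y1][x1] - P[y0][x1] - P[y1][x0] + P[y0][x0]
--             if blocked[y][x] or s < minimo_numero:
--                 fila.append(0)
--             else:
--                 fila.append(s)
--         out.append(fila)
--     return out
-- ===== Notes on version B (the rewrite author's own statement) =====
-- stated objective: faster
-- what changed: Replaces A's per-cell 3x3 re-summation (evaluated twice per kept cell) with a summed-area (2D prefix-sum) table built once, and A's per-cell linear scan of ubicaciones_existentes with a boolean contiguity mask marked once per location; Pre_ excludes ragged arrays with a row shorter than the window span min(len(array[0]), n+1), where B's prefix pass raises IndexError.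
import Mathlib
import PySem

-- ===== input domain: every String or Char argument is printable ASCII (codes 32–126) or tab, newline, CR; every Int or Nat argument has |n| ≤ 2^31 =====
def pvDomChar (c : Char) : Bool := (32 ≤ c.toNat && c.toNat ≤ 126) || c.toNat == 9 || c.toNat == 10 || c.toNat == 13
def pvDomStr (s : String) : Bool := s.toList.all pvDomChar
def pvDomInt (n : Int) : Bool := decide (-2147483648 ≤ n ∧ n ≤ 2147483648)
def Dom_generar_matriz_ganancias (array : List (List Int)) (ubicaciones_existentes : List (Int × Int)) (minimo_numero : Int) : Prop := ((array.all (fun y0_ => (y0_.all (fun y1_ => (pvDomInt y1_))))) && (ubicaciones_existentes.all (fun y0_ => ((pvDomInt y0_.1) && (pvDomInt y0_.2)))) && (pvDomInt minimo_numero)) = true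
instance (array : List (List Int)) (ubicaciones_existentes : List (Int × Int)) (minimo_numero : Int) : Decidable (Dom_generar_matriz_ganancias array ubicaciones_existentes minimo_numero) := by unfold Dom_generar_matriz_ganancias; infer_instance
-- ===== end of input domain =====

-- B replaces A's per-cell (and twice-evaluated) 3x3 re-summation with a summed-area (2D
-- prefix-sum) table built once, and A's per-cell scan of ubicaciones_existentes with a
-- contiguity mask marked once per location (objective: faster, measured).

-- ===== PORT A =====
def calcular_ganancia (array : List (List Int)) (y x : Int) : Int :=
  (PySem.List.pyRange (max 0 (y - 1)) (min (array.length : Int) (y + 2)) 1).foldl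
    (fun s jy =>
      (PySem.List.pyRange (max 0 (x - 1)) (min ((PySem.List.pyGetD array 0 []).length : Int) (x + 2)) 1).foldl
        (fun s jx => s + PySem.List.pyGetD (PySem.List.pyGetD array jy []) jx 0) s) 0
  -- array[jy][jx]: pyGetD is exact here since Pre_ keeps all accessed indices in range

def es_contiguo (x y : Int) (ubicaciones_existentes : List (Int × Int)) (n : Int) : Bool :=
  ubicaciones_existentes.any (fun u =>
    decide (max 0 (y - 1) ≤ u.2 ∧ u.2 ≤ min (n - 1) (y + 1)) &&
    decide (max 0 (x - 1) ≤ u.1 ∧ u.1 ≤ min (n - 1) (x + 1)))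

def generar_matriz_cuadrada (n : Int) : List (List Int) :=
  (PySem.List.pyRange 0 n 1).map (fun _ => (PySem.List.pyRange 0 n 1).map (fun _ => (0 : Int)))

def generar_matriz_ganancias (array : List (List Int)) (ubicaciones_existentes : List (Int × Int)) (minimo_numero : Int) : List (List Int) :=
  let n : Int := (array.length : Int)
  let matriz := generar_matriz_cuadrada n
  -- matriz[y][x] = v with y, x drawn from range(n) (so 0 ≤ y, x < n): modify/set with toNat is exact
  (PySem.List.pyRange 0 n 1).foldl (fun mz y =>
    (PySem.List.pyRange 0 n 1).foldl (fun mz x =>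
      if es_contiguo x y ubicaciones_existentes n ||
         decide (calcular_ganancia array y x < minimo_numero) then
        mz.modify y.toNat (fun row => row.set x.toNat 0)
      else
        mz.modify y.toNat (fun row => row.set x.toNat (calcular_ganancia array y x))) mz) matriz

-- ===== PORT B =====
-- mark the 3x3 neighborhood of one existing in-grid location (Python's nested marking loops;
-- Nat subtraction gives Python's max(0, ·-1), and the 0 ≤ · < n guard makes toNat exact)
def pv_mark (n : Nat) (mask : List (List Bool)) (u : Int × Int) : List (List Bool) :=
  if 0 ≤ u.1 ∧ u.1 < (n : Int) ∧ 0 ≤ u.2 ∧ u.2 < (n : Int) then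
    let ux := u.1.toNat
    let uy := u.2.toNat
    (List.range' (uy - 1) (min n (uy + 2) - (uy - 1))).foldl (fun mask yy =>
      mask.modify yy (fun row =>
        (List.range' (ux - 1) (min n (ux + 2) - (ux - 1))).foldl
          (fun row xx => row.set xx true) row)) mask
  else mask

-- one row of the summed-area pass: cur[0] = 0, cur[j+1] = prev[j+1] + (row[0]+...+row[j])
def pv_rowStep (W : Nat) (prev row : List Int) : List Int :=
  ((List.range W).foldl (fun (p : Int × List Int) j =>
      let acc := p.1 + PySem.List.pyGetD row (Int.ofNat j) 0   -- row[j]: in range on Pre_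
      (acc, p.2.set (j + 1) (prev.getD (j + 1) 0 + acc)))
    ((0 : Int), List.replicate (W + 1) (0 : Int))).2

def generar_matriz_ganancias_alt (array : List (List Int)) (ubicaciones_existentes : List (Int × Int)) (minimo_numero : Int) : List (List Int) :=
  let n := array.length
  if n = 0 then [] else
  let C := array.headI.length
  let W := min C (n + 1)   -- only columns < min(C, n+1) ever fall inside a window
  -- P[i][j] = sum of array[r][c] for r < i, c < j; Python's P[-1] is getLastD (P is nonempty)
  let P := array.foldl (fun P row => P ++ [pv_rowStep W (P.getLastD []) row])
             [List.replicate (W + 1) (0 : Int)]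
  let blocked := ubicaciones_existentes.foldl (pv_mark n)
                   ((List.range n).map (fun _ => List.replicate n false))
  (List.range n).map (fun y =>
    let y0 := y - 1            -- Nat subtraction = Python's max(0, y-1)
    let y1 := min n (y + 2)
    (List.range n).map (fun x =>
      let x0 := min W (x - 1)  -- Python's min(W, max(0, x-1))
      let x1 := min W (x + 2)
      let s := ((P.getD y1 []).getD x1 0) - ((P.getD y0 []).getD x1 0)
             - ((P.getD y1 []).getD x0 0) + ((P.getD y0 []).getD x0 0)
      if (blocked.getD y []).getD x false ||
         decide (s < minimo_numero) then 0 else s))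

-- ===== PRECONDITION & SPEC =====
-- Pre_ excludes ragged inputs having a row shorter than the window span min(len(array[0]), n+1):
-- B's prefix pass reads every row up to that width and raises IndexError there, while A also
-- raises on almost all of them but can return when contiguity short-circuits every such read.
def Pre_generar_matriz_ganancias (array : List (List Int)) (ubicaciones_existentes : List (Int × Int)) (minimo_numero : Int) : Prop :=
  ∀ r ∈ array, min array.headI.length (array.length + 1) ≤ r.length
instance (array : List (List Int)) (ubicaciones_existentes : List (Int × Int)) (minimo_numero : Int) : Decidable (Pre_generar_matriz_ganancias array ubicaciones_existentes minimo_numero) := by unfold Pre_generar_matriz_ganancias; infer_instance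

def pvWitness_generar_matriz_ganancias : List (List Int) × (List (Int × Int)) × Int :=
  ([[1, 2], [3, 4]], [(0, 0)], 3)

def Spec_generar_matriz_ganancias (array : List (List Int)) (ubicaciones_existentes : List (Int × Int)) (minimo_numero : Int) (out : List (List Int)) : Prop := out = generar_matriz_ganancias_alt array ubicaciones_existentes minimo_numero
instance (array : List (List Int)) (ubicaciones_existentes : List (Int × Int)) (minimo_numero : Int) (out : List (List Int)) : Decidable (Spec_generar_matriz_ganancias array ubicaciones_existentes minimo_numero out) := by unfold Spec_generar_matriz_ganancias; infer_instance

-- ===== CLAIM (what is proved, stated in full; the proofs are below) =====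
def Claim_equal_generar_matriz_ganancias : Prop := ∀ (array : List (List Int)) (ubicaciones_existentes : List (Int × Int)) (minimo_numero : Int), Dom_generar_matriz_ganancias array ubicaciones_existentes minimo_numero → Pre_generar_matriz_ganancias array ubicaciones_existentes minimo_numero → Spec_generar_matriz_ganancias array ubicaciones_existentes minimo_numero (generar_matriz_ganancias array ubicaciones_existentes minimo_numero)


-- ===== LEMMAS AND PROOFS =====

-- proof-side abbreviations: cell value, row prefix sum, 2D prefix sum, prefix-table row
def pvVal (a : List (List Int)) (r c : Nat) : Int := (a.getD r []).getD c 0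
def pvSrow (a : List (List Int)) (r j : Nat) : Int := ∑ c ∈ Finset.range j, pvVal a r c
def pvS (a : List (List Int)) (i j : Nat) : Int := ∑ r ∈ Finset.range i, pvSrow a r j
def pvProw (a : List (List Int)) (W i : Nat) : List Int := (List.range (W + 1)).map (fun j => pvS a i j)

theorem list_sum_range (n : Nat) (f : Nat → Int) :
    ((List.range n).map f).sum = ∑ k ∈ Finset.range n, f k := rfl

-- invariant of the inner loop of pv_rowStep
theorem pv_rowStep_inv (prev row : List Int) (W k : Nat) (hk : k ≤ W) :
    (List.range k).foldl (fun (p : Int × List Int) j =>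
        let acc := p.1 + PySem.List.pyGetD row (Int.ofNat j) 0
        (acc, p.2.set (j + 1) (prev.getD (j + 1) 0 + acc)))
      ((0 : Int), List.replicate (W + 1) (0 : Int)) =
    ((∑ c ∈ Finset.range k, row.getD c 0),
     (List.range (W + 1)).map (fun j =>
        if 1 ≤ j ∧ j ≤ k then prev.getD j 0 + ∑ c ∈ Finset.range j, row.getD c 0 else 0)) := by
  induction k with
  | zero =>
      simp only [List.range_zero, List.foldl_nil, Finset.range_zero, Finset.sum_empty]
      have hconst : ∀ j ∈ List.range (W + 1),
          (if 1 ≤ j ∧ j ≤ 0 then prev.getD j 0 + ∑ c ∈ Finset.range j, row.getD c 0 else 0) = (0 : Int) := by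
        intro j _; rw [if_neg (by omega)]
      rw [List.map_congr_left hconst, List.map_const', List.length_range]
  | succ k ih =>
      have hk' : k ≤ W := Nat.le_of_succ_le hk
      rw [List.range_succ, List.foldl_append, ih hk']
      simp only [List.foldl_cons, List.foldl_nil]
      rw [Prod.mk.injEq]
      constructor
      · rw [Finset.sum_range_succ]
        simp [PySem.List.pyGetD_natCast]
      · apply List.ext_getElem
        · simp
        · intro i h1 h2
          simp only [List.length_set, List.length_map, List.length_range] at h1 h2
          rw [List.getElem_set]
          by_cases hik : i = k + 1
          · subst hik
            rw [if_pos rfl]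
            simp only [List.getElem_map, List.getElem_range]
            rw [if_pos (by omega : 1 ≤ k + 1 ∧ k + 1 ≤ k + 1), Finset.sum_range_succ]
            have : PySem.List.pyGetD row (Int.ofNat k) 0 = row.getD k 0 :=
              PySem.List.pyGetD_natCast row k 0
            rw [this]
          · rw [if_neg (by omega : ¬ k + 1 = i)]
            simp only [List.getElem_map, List.getElem_range]
            by_cases h1i : 1 ≤ i ∧ i ≤ k
            · rw [if_pos h1i, if_pos (by omega : 1 ≤ i ∧ i ≤ k + 1)]
            · rw [if_neg h1i, if_neg (by omega : ¬ (1 ≤ i ∧ i ≤ k + 1))]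

theorem pv_rowStep_eq (a : List (List Int)) (W i : Nat) :
    pv_rowStep W (pvProw a W i) (a.getD i []) = pvProw a W (i + 1) := by
  unfold pv_rowStep
  rw [pv_rowStep_inv (pvProw a W i) (a.getD i []) W W le_rfl]
  apply List.map_congr_left
  intro j hj
  rw [List.mem_range] at hj
  by_cases h0 : 1 ≤ j ∧ j ≤ W
  · rw [if_pos h0]
    have hjW : j < W + 1 := by omega
    have hprev : (pvProw a W i).getD j 0 = pvS a i j := by
      unfold pvProw
      rw [List.getD_eq_getElem _ _ (by simpa using hjW)]
      simp
    rw [hprev]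
    unfold pvS pvSrow pvVal
    rw [Finset.sum_range_succ]
  · rw [if_neg h0]
    have hj0 : j = 0 := by omega
    subst hj0
    unfold pvS pvSrow
    simp

-- the table-building fold produces exactly the rows pvProw a W 0 .. pvProw a W (length a)
theorem pv_Pfold (a : List (List Int)) (W : Nat) :
    ∀ (rs : List (List Int)) (i : Nat), i ≤ a.length → rs = a.drop i →
    rs.foldl (fun P row => P ++ [pv_rowStep W (P.getLastD []) row])
        ((List.range (i + 1)).map (pvProw a W)) =
    (List.range (a.length + 1)).map (pvProw a W) := by
  intro rs
  induction rs with
  | nil =>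
      intro i hi hdrop
      have : i = a.length := by
        have := congrArg List.length hdrop
        simp at this
        omega
      subst this
      simp
  | cons r rs' ih =>
      intro i hi hdrop
      have hlt : i < a.length := by
        have hlen := congrArg List.length hdrop
        simp at hlen
        omega
      obtain ⟨hr, hrs'⟩ : r = a[i] ∧ rs' = a.drop (i + 1) := by
        rw [← List.getElem_cons_drop hlt] at hdrop
        exact List.cons_eq_cons.mp hdrop
      simp only [List.foldl_cons]
      have hlast : ((List.range (i + 1)).map (pvProw a W)).getLastD [] = pvProw a W i := by
        rw [List.range_succ, List.map_append]
        simp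
      rw [hlast, hr]
      have hget : a[i] = a.getD i [] := (List.getD_eq_getElem a [] hlt).symm
      rw [hget, pv_rowStep_eq]
      have hacc : (List.range (i + 1)).map (pvProw a W) ++ [pvProw a W (i + 1)] =
          (List.range (i + 1 + 1)).map (pvProw a W) := by
        simp [List.range_succ]
      rw [hacc]
      exact ih (i + 1) (by omega) hrs'

-- inclusion–exclusion for the summed-area table
theorem pv_window (a : List (List Int)) (i0 i1 j0 j1 : Nat) (hi : i0 ≤ i1) (hj : j0 ≤ j1) :
    pvS a i1 j1 - pvS a i0 j1 - pvS a i1 j0 + pvS a i0 j0 =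
    ∑ r ∈ Finset.Ico i0 i1, ∑ c ∈ Finset.Ico j0 j1, pvVal a r c := by
  have hrow : ∀ r, (∑ c ∈ Finset.Ico j0 j1, pvVal a r c) = pvSrow a r j1 - pvSrow a r j0 :=
    fun r => Finset.sum_Ico_eq_sub _ hj
  calc pvS a i1 j1 - pvS a i0 j1 - pvS a i1 j0 + pvS a i0 j0
      = (pvS a i1 j1 - pvS a i0 j1) - (pvS a i1 j0 - pvS a i0 j0) := by ring
    _ = (∑ r ∈ Finset.Ico i0 i1, pvSrow a r j1) - (∑ r ∈ Finset.Ico i0 i1, pvSrow a r j0) := by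
        rw [Finset.sum_Ico_eq_sub _ hi, Finset.sum_Ico_eq_sub _ hi]; rfl
    _ = ∑ r ∈ Finset.Ico i0 i1, (pvSrow a r j1 - pvSrow a r j0) := (Finset.sum_sub_distrib _ _).symm
    _ = ∑ r ∈ Finset.Ico i0 i1, ∑ c ∈ Finset.Ico j0 j1, pvVal a r c := by
        exact Finset.sum_congr rfl (fun r _ => (hrow r).symm)

-- A's gain as a double interval sum
theorem calcular_ganancia_eq (a : List (List Int)) (y x : Nat) (hy : y < a.length) :
    calcular_ganancia a (y : Int) (x : Int) =
    ∑ r ∈ Finset.Ico (y - 1) (min a.length (y + 2)),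
      ∑ c ∈ Finset.Ico (x - 1) (min a.headI.length (x + 2)), pvVal a r c := by
  unfold calcular_ganancia
  have hC : PySem.List.pyGetD a 0 [] = a.headI := by
    cases a with
    | nil => simp at hy
    | cons h t =>
        have := PySem.List.pyGetD_natCast (h :: t) 0 []
        simpa using this
  rw [hC]
  have hlo : max 0 ((y : Int) - 1) = ((y - 1 : Nat) : Int) := by omega
  have hhi : min ((a.length : Nat) : Int) ((y : Int) + 2) = ((min a.length (y + 2) : Nat) : Int) := by omega
  have hlo' : max 0 ((x : Int) - 1) = ((x - 1 : Nat) : Int) := by omega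
  have hhi' : min ((a.headI.length : Nat) : Int) ((x : Int) + 2) = ((min a.headI.length (x + 2) : Nat) : Int) := by omega
  rw [hlo, hhi, hlo', hhi']
  simp only [PySem.List.pyRange_one, List.foldl_map, PySem.List.foldl_add, zero_add,
    list_sum_range]
  rw [Finset.sum_Ico_eq_sum_range]
  have hcnt : (((min a.length (y + 2) : Nat) : Int) - ((y - 1 : Nat) : Int)).toNat = min a.length (y + 2) - (y - 1) := by omega
  rw [hcnt]
  apply Finset.sum_congr rfl
  intro k _
  rw [Finset.sum_Ico_eq_sum_range]
  have hcnt' : (((min a.headI.length (x + 2) : Nat) : Int) - ((x - 1 : Nat) : Int)).toNat = min a.headI.length (x + 2) - (x - 1) := by omega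
  rw [hcnt']
  apply Finset.sum_congr rfl
  intro k' _
  have h1 : ((y - 1 : Nat) : Int) + (k : Int) = (((y - 1) + k : Nat) : Int) := by push_cast; ring
  have h2 : ((x - 1 : Nat) : Int) + (k' : Int) = (((x - 1) + k' : Nat) : Int) := by push_cast; ring
  rw [h1, h2, PySem.List.pyGetD_natCast, PySem.List.pyGetD_natCast]
  rfl

-- generic fold-over-range list-update lemmas (for A's in-place writes)
theorem modFold_length {α : Type} (f : Nat → α → α) (l : List Nat) (l0 : List α) :
    (l.foldl (fun acc y => acc.modify y (f y)) l0).length = l0.length := by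
  induction l generalizing l0 with
  | nil => rfl
  | cons x l ih => simp [List.foldl_cons, ih, List.length_modify]

theorem modFold_getElem? {α : Type} (f : Nat → α → α) (l0 : List α) (n : Nat) (i : Nat)
    (hi : i < l0.length) :
    ((List.range n).foldl (fun acc y => acc.modify y (f y)) l0)[i]? =
    some (if i < n then f i l0[i] else l0[i]) := by
  induction n with
  | zero => simp [List.getElem?_eq_getElem hi]
  | succ n ih =>
      have e : (List.range (n + 1)).foldl (fun acc y => acc.modify y (f y)) l0 =
          ((List.range n).foldl (fun acc y => acc.modify y (f y)) l0).modify n (f n) := by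
        rw [List.range_succ, List.foldl_append]
        rfl
      rw [e, List.getElem?_modify, ih]
      show some (if n = i then f n (if i < n then f i l0[i] else l0[i]) else if i < n then f i l0[i] else l0[i]) = _
      by_cases hni : n = i
      · subst hni
        rw [if_pos rfl, if_neg (Nat.lt_irrefl n), if_pos (Nat.lt_succ_self n)]
      · rw [if_neg hni]
        by_cases hlt2 : i < n
        · rw [if_pos hlt2, if_pos (by omega)]
        · rw [if_neg hlt2, if_neg (by omega)]

theorem setFold_length (g : Nat → Int) (l : List Nat) (r0 : List Int) :
    (l.foldl (fun r x => r.set x (g x)) r0).length = r0.length := by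
  induction l generalizing r0 with
  | nil => rfl
  | cons x l ih => simp [List.foldl_cons, ih]

theorem setFold_getElem? (g : Nat → Int) (r0 : List Int) (n : Nat) (i : Nat)
    (hi : i < r0.length) :
    ((List.range n).foldl (fun r x => r.set x (g x)) r0)[i]? =
    some (if i < n then g i else r0[i]) := by
  induction n with
  | zero => simp [List.getElem?_eq_getElem hi]
  | succ n ih =>
      have e : (List.range (n + 1)).foldl (fun r x => r.set x (g x)) r0 =
          ((List.range n).foldl (fun r x => r.set x (g x)) r0).set n (g n) := by
        rw [List.range_succ, List.foldl_append]
        rfl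
      rw [e, List.getElem?_set, setFold_length, ih]
      by_cases hni : n = i
      · subst hni
        rw [if_pos rfl, if_pos hi]
        rw [if_pos (Nat.lt_succ_self n)]
      · rw [if_neg hni]
        by_cases hlt2 : i < n
        · rw [if_pos hlt2, if_pos (by omega)]
        · rw [if_neg hlt2, if_neg (by omega)]

theorem modify_modify {α : Type} (l : List α) (i : Nat) (f g : α → α) :
    (l.modify i f).modify i g = l.modify i (fun x => g (f x)) := by
  apply List.ext_getElem
  · simp [List.length_modify]
  · intro j h1 h2
    simp only [List.getElem_modify]
    by_cases h : i = j <;> simp [h]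

theorem inner_collapse (y : Nat) (g : Nat → Int) :
    ∀ (l : List Nat) (mz : List (List Int)),
    l.foldl (fun mz x => mz.modify y (fun row => row.set x (g x))) mz =
    mz.modify y (fun row => l.foldl (fun row x => row.set x (g x)) row) := by
  intro l
  induction l with
  | nil =>
      intro mz
      apply List.ext_getElem
      · simp [List.length_modify]
      · intro i h1 h2
        rw [List.getElem_modify]
        split <;> rfl
  | cons x l ih =>
      intro mz
      simp only [List.foldl_cons]
      rw [ih, modify_modify]

-- A in map normal form
theorem foldl_if_modify (y : Nat) (c : Nat → Bool) (v : Nat → Int) (l : List Nat)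
    (mz : List (List Int)) :
    List.foldl (fun mz x => if c x = true then mz.modify y (fun row => row.set x 0)
                            else mz.modify y (fun row => row.set x (v x))) mz l =
    mz.modify y (fun row =>
      List.foldl (fun row x => row.set x (if c x = true then 0 else v x)) row l) := by
  have hfun : (fun (mz : List (List Int)) (x : Nat) =>
      if c x = true then mz.modify y (fun row => row.set x 0)
      else mz.modify y (fun row => row.set x (v x))) =
      fun (mz : List (List Int)) (x : Nat) =>
        mz.modify y (fun row => row.set x (if c x = true then 0 else v x)) := by
    funext mz x
    by_cases h : c x = true <;> simp [h]
  rw [hfun, inner_collapse]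

theorem A_eq_map (a : List (List Int)) (ub : List (Int × Int)) (m : Int) :
    generar_matriz_ganancias a ub m =
    (List.range a.length).map (fun (y : Nat) => (List.range a.length).map (fun (x : Nat) =>
      if es_contiguo ((x : Int)) ((y : Int)) ub ((a.length : Int)) ||
         decide (calcular_ganancia a ((y : Int)) ((x : Int)) < m) then 0
      else calcular_ganancia a ((y : Int)) ((x : Int)))) := by
  unfold generar_matriz_ganancias generar_matriz_cuadrada
  simp only [PySem.List.pyRange_zero_natCast, List.foldl_map, Int.toNat_natCast, List.map_map]
  simp only [foldl_if_modify]
  set n := a.length with hn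
  set l0 : List (List Int) :=
    List.map ((fun _ => List.map ((fun _ => (0 : Int)) ∘ fun (k : Nat) => (k : Int)) (List.range n)) ∘
      fun (k : Nat) => (k : Int)) (List.range n) with hl0
  have hl0len : l0.length = n := by simp [hl0]
  apply List.ext_getElem?
  intro y
  by_cases hy : y < n
  · rw [modFold_getElem? _ l0 n y (by omega), if_pos hy]
    rw [List.getElem?_map, List.getElem?_range hy]
    simp only [Option.map_some]
    have hl0y : l0[y] = List.map ((fun _ => (0 : Int)) ∘ fun (k : Nat) => (k : Int)) (List.range n) := by
      simp [hl0]
    rw [hl0y]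
    congr 1
    apply List.ext_getElem?
    intro x
    by_cases hx : x < n
    · rw [setFold_getElem? _ _ n x (by simp; omega), if_pos hx]
      rw [List.getElem?_map, List.getElem?_range hx]
      rfl
    · rw [List.getElem?_eq_none (by rw [setFold_length]; simp; omega),
          List.getElem?_eq_none (by simp; omega)]
  · rw [List.getElem?_eq_none (by rw [modFold_length]; omega),
        List.getElem?_eq_none (by simp; omega)]

theorem pvProw_zero (a : List (List Int)) (W : Nat) :
    pvProw a W 0 = List.replicate (W + 1) (0 : Int) := by
  apply List.ext_getElem
  · simp [pvProw]
  · intro i h1 h2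
    simp [pvProw, pvS]


-- ----- contiguity-mask lemmas -----
def pv_cond (n : Nat) (u : Int × Int) (y x : Nat) : Bool :=
  decide (0 ≤ u.1 ∧ u.1 < (n : Int) ∧ 0 ≤ u.2 ∧ u.2 < (n : Int) ∧
    u.2.toNat - 1 ≤ y ∧ y < min n (u.2.toNat + 2) ∧
    u.1.toNat - 1 ≤ x ∧ x < min n (u.1.toNat + 2))

theorem setTrueFold_length (l : List Nat) (r : List Bool) :
    (l.foldl (fun r x => r.set x true) r).length = r.length := by
  induction l generalizing r with
  | nil => rfl
  | cons a l ih => simp [List.foldl_cons, ih]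

theorem setTrueFold_getD (len : Nat) : ∀ (a : Nat) (r : List Bool) (x : Nat), x < r.length →
    ((List.range' a len).foldl (fun r xx => r.set xx true) r).getD x false =
    (r.getD x false || decide (a ≤ x ∧ x < a + len)) := by
  induction len with
  | zero =>
      intro a r x hx
      have : ¬ (a ≤ x ∧ x < a + 0) := by omega
      simp [this]
  | succ len ih =>
      intro a r x hx
      rw [List.range'_succ, List.foldl_cons, ih (a + 1) (r.set a true) x (by simpa using hx)]
      have hset : (r.set a true).getD x false = if a = x then true else r.getD x false := by
        rw [List.getD_eq_getElem _ _ (by simpa using hx), List.getElem_set]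
        split <;> [rfl; rw [List.getD_eq_getElem _ _ hx]]
      rw [hset]
      by_cases hax : a = x
      · subst hax
        have : a ≤ a ∧ a < a + (len + 1) := by omega
        simp [this]
      · rw [if_neg hax]
        have : (a + 1 ≤ x ∧ x < a + 1 + len) ↔ (a ≤ x ∧ x < a + (len + 1)) := by omega
        simp only [this]

theorem modifyTrueFold_getD (g : List Bool → List Bool) (lenb : Nat) :
    ∀ (b : Nat) (mask : List (List Bool)) (y : Nat), y < mask.length →
    ((List.range' b lenb).foldl (fun m yy => m.modify yy g) mask).getD y [] =
    (if b ≤ y ∧ y < b + lenb then g (mask.getD y []) else mask.getD y []) := by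
  induction lenb with
  | zero =>
      intro b mask y hy
      have : ¬ (b ≤ y ∧ y < b + 0) := by omega
      simp [this]
  | succ lenb ih =>
      intro b mask y hy
      rw [List.range'_succ, List.foldl_cons, ih (b + 1) (mask.modify b g) y (by simpa using hy)]
      have hmod : (mask.modify b g).getD y [] =
          if b = y then g (mask.getD y []) else mask.getD y [] := by
        rw [List.getD_eq_getElem _ _ (by simpa using hy), List.getElem_modify,
            List.getD_eq_getElem _ _ hy]
      rw [hmod]
      by_cases hby : b = y
      · subst hby
        rw [if_neg (by omega), if_pos rfl, if_pos (by omega)]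
      · rw [if_neg hby]
        have : (b + 1 ≤ y ∧ y < b + 1 + lenb) ↔ (b ≤ y ∧ y < b + (lenb + 1)) := by omega
        simp only [this]

theorem pv_mark_length (n : Nat) (mask : List (List Bool)) (u : Int × Int) :
    (pv_mark n mask u).length = mask.length := by
  unfold pv_mark
  split
  · exact modFold_length _ _ mask
  · rfl

theorem pv_mark_rows (n : Nat) (mask : List (List Bool)) (u : Int × Int) (i : Nat) :
    ((pv_mark n mask u).getD i []).length = (mask.getD i []).length := by
  unfold pv_mark
  split
  · by_cases hi : i < mask.length
    · rw [modifyTrueFold_getD _ _ _ mask i hi]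
      split
      · rw [setTrueFold_length]
      · rfl
    · rw [List.getD_eq_getElem?_getD, List.getElem?_eq_none (by rw [modFold_length]; omega),
          List.getD_eq_getElem?_getD, List.getElem?_eq_none (by omega)]
  · rfl

theorem pv_mark_getD (n : Nat) (mask : List (List Bool)) (u : Int × Int) (y x : Nat)
    (hlen : mask.length = n) (hrow : ((mask.getD y []).length = n)) (hy : y < n) (hx : x < n) :
    ((pv_mark n mask u).getD y []).getD x false =
    ((mask.getD y []).getD x false || pv_cond n u y x) := by
  unfold pv_mark
  split
  · rename_i hin
    rw [modifyTrueFold_getD _ _ _ mask y (by omega)]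
    by_cases hyr : u.2.toNat - 1 ≤ y ∧ y < min n (u.2.toNat + 2)
    · rw [if_pos (by omega), setTrueFold_getD _ _ _ x (by omega)]
      congr 1
      unfold pv_cond
      exact decide_eq_decide.mpr (by omega)
    · rw [if_neg (by omega)]
      have hc : pv_cond n u y x = false := by
        unfold pv_cond
        exact decide_eq_false (by omega)
      rw [hc, Bool.or_false]
  · rename_i hin
    have hc : pv_cond n u y x = false := by
      unfold pv_cond
      exact decide_eq_false (by omega)
    rw [hc, Bool.or_false]

theorem blockedFold_getD (n : Nat) :
    ∀ (l : List (Int × Int)) (mask : List (List Bool)) (y x : Nat),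
    mask.length = n → (mask.getD y []).length = n → y < n → x < n →
    ((l.foldl (pv_mark n) mask).getD y []).getD x false =
    ((mask.getD y []).getD x false || l.any (fun u => pv_cond n u y x)) := by
  intro l
  induction l with
  | nil =>
      intro mask y x _ _ _ _
      simp
  | cons u l ih =>
      intro mask y x hlen hrow hy hx
      rw [List.foldl_cons,
          ih (pv_mark n mask u) y x (by rw [pv_mark_length, hlen]) (by rw [pv_mark_rows, hrow]) hy hx,
          pv_mark_getD n mask u y x hlen hrow hy hx, List.any_cons, Bool.or_assoc]

theorem blocked_eq_contiguo (ub : List (Int × Int)) (n y x : Nat) (hy : y < n) (hx : x < n) :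
    ((ub.foldl (pv_mark n) ((List.range n).map (fun _ => List.replicate n false))).getD y []).getD x
      false = es_contiguo ((x : Nat) : Int) ((y : Nat) : Int) ub ((n : Nat) : Int) := by
  have hmask0 : ((List.range n).map (fun (_ : Nat) => List.replicate n false)).getD y [] =
      List.replicate n false := by
    rw [List.getD_eq_getElem _ _ (by simpa using hy)]
    simp
  rw [blockedFold_getD n ub _ y x (by simp) (by rw [hmask0]; simp) hy hx, hmask0]
  have h0 : (List.replicate n false).getD x false = false := by
    rw [List.getD_eq_getElem _ _ (by simpa using hx)]
    simp
  rw [h0, Bool.false_or]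
  unfold es_contiguo
  refine List.any_congr rfl ?_
  intro u
  unfold pv_cond
  rw [show (decide (max 0 ((y : Int) - 1) ≤ u.2 ∧ u.2 ≤ min ((n : Int) - 1) ((y : Int) + 1)) &&
        decide (max 0 ((x : Int) - 1) ≤ u.1 ∧ u.1 ≤ min ((n : Int) - 1) ((x : Int) + 1))) =
      decide ((max 0 ((y : Int) - 1) ≤ u.2 ∧ u.2 ≤ min ((n : Int) - 1) ((y : Int) + 1)) ∧
        (max 0 ((x : Int) - 1) ≤ u.1 ∧ u.1 ≤ min ((n : Int) - 1) ((x : Int) + 1))) from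
    (Bool.decide_and _ _).symm]
  apply decide_eq_decide.mpr
  omega

theorem alt_eq_map (a : List (List Int)) (ub : List (Int × Int)) (m : Int) (hne : a ≠ []) :
    generar_matriz_ganancias_alt a ub m =
    (List.range a.length).map (fun (y : Nat) => (List.range a.length).map (fun (x : Nat) =>
      if ((ub.foldl (pv_mark a.length) ((List.range a.length).map (fun _ => List.replicate a.length false))).getD y []).getD x false ||
         decide ((pvS a (min a.length (y + 2)) (min (min a.headI.length (a.length + 1)) (x + 2)) -
                  pvS a (y - 1) (min (min a.headI.length (a.length + 1)) (x + 2)) -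
                  pvS a (min a.length (y + 2)) (min (min a.headI.length (a.length + 1)) (x - 1)) +
                  pvS a (y - 1) (min (min a.headI.length (a.length + 1)) (x - 1))) < m) then 0
      else (pvS a (min a.length (y + 2)) (min (min a.headI.length (a.length + 1)) (x + 2)) -
            pvS a (y - 1) (min (min a.headI.length (a.length + 1)) (x + 2)) -
            pvS a (min a.length (y + 2)) (min (min a.headI.length (a.length + 1)) (x - 1)) +
            pvS a (y - 1) (min (min a.headI.length (a.length + 1)) (x - 1))))) := by
  have hlen0 : a.length ≠ 0 := by simpa [List.length_eq_zero_iff] using hne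
  dsimp only [generar_matriz_ganancias_alt]
  rw [if_neg hlen0]
  set W := min a.headI.length (a.length + 1) with hW
  have h0 : [List.replicate (W + 1) (0 : Int)] = (List.range (0 + 1)).map (pvProw a W) := by
    simp [pvProw_zero]
  rw [h0, pv_Pfold a W a 0 (Nat.zero_le _) (List.drop_zero).symm]
  have hPget : ∀ i, i ≤ a.length →
      ((List.range (a.length + 1)).map (pvProw a W)).getD i [] = pvProw a W i := by
    intro i hi
    rw [List.getD_eq_getElem _ _ (by simp; omega)]
    simp
  have hProwget : ∀ i j, j ≤ W → (pvProw a W i).getD j 0 = pvS a i j := by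
    intro i j hj
    unfold pvProw
    rw [List.getD_eq_getElem _ _ (by simp; omega)]
    simp
  apply List.map_congr_left
  intro y hy
  rw [List.mem_range] at hy
  apply List.map_congr_left
  intro x hx
  rw [List.mem_range] at hx
  rw [hPget (min a.length (y + 2)) (by omega), hPget (y - 1) (by omega)]
  rw [hProwget _ _ (by omega), hProwget _ _ (by omega), hProwget _ _ (by omega),
      hProwget _ _ (by omega)]

-- ===== VERDICT (by name: the statement is the Claim_ definition above) =====
theorem generar_matriz_ganancias_spec : Claim_equal_generar_matriz_ganancias := by
  intro a ub m _ _
  unfold Spec_generar_matriz_ganancias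
  rcases eq_or_ne a [] with rfl | hne
  · rfl
  · rw [A_eq_map, alt_eq_map a ub m hne]
    apply List.map_congr_left
    intro y hy
    rw [List.mem_range] at hy
    apply List.map_congr_left
    intro x hx
    rw [List.mem_range] at hx
    have hgain : calcular_ganancia a ((y : Int)) ((x : Int)) =
        pvS a (min a.length (y + 2)) (min (min a.headI.length (a.length + 1)) (x + 2)) -
        pvS a (y - 1) (min (min a.headI.length (a.length + 1)) (x + 2)) -
        pvS a (min a.length (y + 2)) (min (min a.headI.length (a.length + 1)) (x - 1)) +
        pvS a (y - 1) (min (min a.headI.length (a.length + 1)) (x - 1)) := by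
      rw [calcular_ganancia_eq a y x hy]
      rw [pv_window a (y - 1) (min a.length (y + 2))
            (min (min a.headI.length (a.length + 1)) (x - 1))
            (min (min a.headI.length (a.length + 1)) (x + 2)) (by omega) (by omega)]
      have hIco : Finset.Ico (x - 1) (min a.headI.length (x + 2)) =
          Finset.Ico (min (min a.headI.length (a.length + 1)) (x - 1))
                     (min (min a.headI.length (a.length + 1)) (x + 2)) := by
        ext c
        simp only [Finset.mem_Ico]
        omega
      rw [hIco]
    rw [hgain, blocked_eq_contiguo ub a.length y x hy hx]
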